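-- pv_equiv track=rewrite | github.com/dpryshchepa/utils | dbt/check_dbt_descriptions.py | find_child_block
-- ===== SOURCE A (Python) =====
-- def get_indent(line):
--     return len(line) - len(line.lstrip())
--
-- def find_child_block(lines, parent_idx, key=None, name=None):
--     """
--     Finds a child block inside parent_idx.
--     If key is provided, looks for 'key:'.
--     If name is provided, looks for '- name: name'.
--     Returns the line index or -1.
--     """
--     if parent_idx >= len(lines):
--         return -1
--
--     parent_indent = get_indent(lines[parent_idx])
--
--     for i in range(parent_idx + 1, len(lines)):
--         line = lines[i]
--         stripped = line.strip()
--
--         # Skip empty lines and comments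
--         if not stripped or stripped.startswith('#'):
--             continue
--
--         curr_indent = get_indent(line)
--
--         # If we went back to parent level or higher, we failed to find it in the block
--         if curr_indent <= parent_indent:
--             return -1
--
--         if key and stripped.startswith(f"{key}:"):
--             return i
--
--         if name and stripped.startswith("- name:"):
--             val = stripped.split(':', 1)[1].strip()
--             # Remove quotes
--             if (val.startswith('"') and val.endswith('"')) or (val.startswith("'") and val.endswith("'")):
--                 val = val[1:-1]
--             if val == name:
--                 return i
--
--     return -1
-- ===== SOURCE B (Python) =====
-- def get_indent(line):
--     return len(line) - len(line.lstrip())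
--
-- def find_child_block(lines, parent_idx, key=None, name=None):
--     """Two-pass version: first find the block's end, then search inside it."""
--     n = len(lines)
--     if parent_idx >= n:
--         return -1
--     parent_indent = get_indent(lines[parent_idx])
--
--     # Pass 1: block_end = first relevant line at or above parent level.
--     block_end = n
--     for i in range(parent_idx + 1, n):
--         stripped = lines[i].strip()
--         if not stripped or stripped.startswith('#'):
--             continue
--         if get_indent(lines[i]) <= parent_indent:
--             block_end = i
--             break
--
--     # Pass 2: search strictly inside the block.
--     for i in range(parent_idx + 1, block_end):
--         stripped = lines[i].strip()
--         if not stripped or stripped.startswith('#'):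
--             continue
--         if key and stripped.startswith(key + ':'):
--             return i
--         if name and stripped.startswith('- name:'):
--             val = stripped.split(':', 1)[1].strip()
--             if (val.startswith('"') and val.endswith('"')) or (val.startswith("'") and val.endswith("'")):
--                 val = val[1:-1]
--             if val == name:
--                 return i
--     return -1
-- ===== Notes on version B (the rewrite author's own statement) =====
-- stated objective: alternative
-- what changed: A interleaves the boundary test with the matching in one loop; B first computes the block's end index in a separate boundary pass and then searches for the key/name match only inside that slice.
import Mathlib
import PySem

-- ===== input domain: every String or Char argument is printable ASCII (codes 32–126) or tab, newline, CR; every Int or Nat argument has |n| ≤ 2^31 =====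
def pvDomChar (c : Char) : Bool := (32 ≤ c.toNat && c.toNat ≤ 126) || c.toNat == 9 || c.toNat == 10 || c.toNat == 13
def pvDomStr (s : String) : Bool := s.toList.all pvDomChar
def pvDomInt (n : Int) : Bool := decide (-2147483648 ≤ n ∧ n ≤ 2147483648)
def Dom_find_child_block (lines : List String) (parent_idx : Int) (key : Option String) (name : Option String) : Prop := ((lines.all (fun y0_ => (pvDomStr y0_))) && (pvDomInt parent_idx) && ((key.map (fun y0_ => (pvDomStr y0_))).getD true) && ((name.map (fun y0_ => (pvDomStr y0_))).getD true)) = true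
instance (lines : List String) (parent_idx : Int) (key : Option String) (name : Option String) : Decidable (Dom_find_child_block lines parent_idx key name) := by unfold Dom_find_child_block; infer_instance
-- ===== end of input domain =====

-- B replaces A's single interleaved scan by two separate passes: one that finds the
-- block's end index, one that searches for the match strictly inside that slice
-- (objective: alternative decomposition; same asymptotic cost).

-- ===== PORT A =====
-- shared module helper: get_indent(line) = len(line) - len(line.lstrip())
def get_indent (line : String) : Int :=
  PySem.Str.len line - PySem.Str.len (PySem.Str.lstrip line)

-- shared predicates (identical source text in Source A and Source B):
-- 'not stripped or stripped.startswith("#")'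
def fcbSkip (stripped : String) : Bool :=
  stripped == "" || PySem.Str.startswith stripped "#"

-- 'key and stripped.startswith(f"{key}:")'  (f"{key}:" = key + ":")
def fcbKeyHit (key : Option String) (stripped : String) : Bool :=
  match key with
  | none => false
  | some k => !(k == "") && PySem.Str.startswith stripped (k ++ ":")

-- 'name and stripped.startswith("- name:")' followed by the quote-stripping value parse
def fcbNameHit (name : Option String) (stripped : String) : Bool :=
  match name with
  | none => false
  | some nm =>
    !(nm == "") && PySem.Str.startswith stripped "- name:" &&
      (let val := PySem.Str.strip (PySem.List.pyGetD ((PySem.Str.splitMax? stripped ":" 1).getD []) 1 "")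
       let val' :=
         if (PySem.Str.startswith val "\"" && PySem.Str.endswith val "\"")
            || (PySem.Str.startswith val "'" && PySem.Str.endswith val "'") then
           PySem.Str.slice val (some 1) (some (-1))
         else val
       val' == nm)

-- A's single loop 'for i in range(parent_idx+1, len(lines)): …'
def fcbLoopA (lines : List String) (parentIndent : Int) (key name : Option String) : List Int → Int
  | [] => -1
  | i :: rest =>
    let line := PySem.List.pyGetD lines i ""
    let stripped := PySem.Str.strip line
    if fcbSkip stripped then fcbLoopA lines parentIndent key name rest
    else if get_indent line ≤ parentIndent then -1
    else if fcbKeyHit key stripped then i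
    else if fcbNameHit name stripped then i
    else fcbLoopA lines parentIndent key name rest

def find_child_block (lines : List String) (parent_idx : Int) (key : Option String) (name : Option String) : Int :=
  if (lines.length : Int) ≤ parent_idx then -1
  else
    let parentIndent := get_indent (PySem.List.pyGetD lines parent_idx "")
    fcbLoopA lines parentIndent key name
      (PySem.List.pyRange (parent_idx + 1) (lines.length : Int) 1)

-- ===== PORT B =====
-- pass 1 of Source B: first non-skipped index at or above parent level (default n)
def fcbEnd (lines : List String) (parentIndent : Int) (n : Int) : List Int → Int
  | [] => n
  | i :: rest =>
    let stripped := PySem.Str.strip (PySem.List.pyGetD lines i "")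
    if fcbSkip stripped then fcbEnd lines parentIndent n rest
    else if get_indent (PySem.List.pyGetD lines i "") ≤ parentIndent then i
    else fcbEnd lines parentIndent n rest

-- pass 2 of Source B: match search inside the block (no indent test here)
def fcbLoopB (lines : List String) (key name : Option String) : List Int → Int
  | [] => -1
  | i :: rest =>
    let stripped := PySem.Str.strip (PySem.List.pyGetD lines i "")
    if fcbSkip stripped then fcbLoopB lines key name rest
    else if fcbKeyHit key stripped then i
    else if fcbNameHit name stripped then i
    else fcbLoopB lines key name rest

def find_child_block_alt (lines : List String) (parent_idx : Int) (key : Option String) (name : Option String) : Int :=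
  if (lines.length : Int) ≤ parent_idx then -1
  else
    let parentIndent := get_indent (PySem.List.pyGetD lines parent_idx "")
    let blockEnd := fcbEnd lines parentIndent (lines.length : Int)
      (PySem.List.pyRange (parent_idx + 1) (lines.length : Int) 1)
    fcbLoopB lines key name (PySem.List.pyRange (parent_idx + 1) blockEnd 1)

-- ===== PRECONDITION & SPEC =====
-- Pre_ excludes exactly parent_idx < -len(lines), where Python A raises IndexError on lines[parent_idx].
def Pre_find_child_block (lines : List String) (parent_idx : Int) (key : Option String) (name : Option String) : Prop :=
  -(lines.length : Int) ≤ parent_idx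
instance (lines : List String) (parent_idx : Int) (key : Option String) (name : Option String) : Decidable (Pre_find_child_block lines parent_idx key name) := by unfold Pre_find_child_block; infer_instance

def pvWitness_find_child_block : List String × Int × Option String × Option String :=
  (["a:", "  # c", "  b: 1", "  - name: 'x'"], 0, some "b", some "x")

def Spec_find_child_block (lines : List String) (parent_idx : Int) (key : Option String) (name : Option String) (out : Int) : Prop := out = find_child_block_alt lines parent_idx key name
instance (lines : List String) (parent_idx : Int) (key : Option String) (name : Option String) (out : Int) : Decidable (Spec_find_child_block lines parent_idx key name out) := by unfold Spec_find_child_block; infer_instance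

-- ===== CLAIM (what is proved, stated in full; the proofs are below) =====
def Claim_equal_find_child_block : Prop := ∀ (lines : List String) (parent_idx : Int) (key : Option String) (name : Option String), Dom_find_child_block lines parent_idx key name → Pre_find_child_block lines parent_idx key name → Spec_find_child_block lines parent_idx key name (find_child_block lines parent_idx key name)

-- ===== LEMMAS AND PROOFS =====

-- 'keep i' ↔ the interleaved loop does not stop at index i (skip, or strictly deeper than parent)
def fcbKeep (lines : List String) (parentIndent : Int) (i : Int) : Bool :=
  fcbSkip (PySem.Str.strip (PySem.List.pyGetD lines i "")) ||
    !(get_indent (PySem.List.pyGetD lines i "") ≤ parentIndent)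

-- A's loop equals B's matching loop run on the prefix before the first stopping index
theorem loopA_eq_loopB_takeWhile (lines : List String) (pI : Int) (key name : Option String) :
    ∀ l : List Int, fcbLoopA lines pI key name l = fcbLoopB lines key name (l.takeWhile (fcbKeep lines pI)) := by
  intro l
  induction l with
  | nil => rfl
  | cons i rest ih =>
    by_cases hs : fcbSkip (PySem.Str.strip (PySem.List.pyGetD lines i "")) = true
    · simp [fcbLoopA, fcbLoopB, fcbKeep, hs, ih]
    · by_cases hb : get_indent (PySem.List.pyGetD lines i "") ≤ pI
      · simp [fcbLoopA, fcbLoopB, fcbKeep, hs, hb]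
      · simp only [fcbLoopA, fcbKeep, List.takeWhile]
        simp [hs, hb, fcbLoopB, ih]

-- the boundary pass computes exactly the takeWhile prefix, as a range
theorem fcbEnd_spec (lines : List String) (pI : Int) :
    ∀ (d : Nat) (s n : Int), s ≤ n → (n - s).toNat = d →
      s ≤ fcbEnd lines pI n (PySem.List.pyRange s n 1) ∧
      PySem.List.pyRange s (fcbEnd lines pI n (PySem.List.pyRange s n 1)) 1
        = (PySem.List.pyRange s n 1).takeWhile (fcbKeep lines pI) := by
  intro d
  induction d with
  | zero =>
    intro s n hsn hd
    have hse : s = n := by omega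
    subst hse
    simp [PySem.List.pyRange_zero, fcbEnd]
  | succ d ih =>
    intro s n hsn hd
    have hlt : s < n := by omega
    rw [PySem.List.pyRange_one_cons hlt]
    by_cases hk : fcbKeep lines pI s = true
    · have hrec : fcbEnd lines pI n (s :: PySem.List.pyRange (s+1) n 1)
          = fcbEnd lines pI n (PySem.List.pyRange (s+1) n 1) := by
        rcases Bool.or_eq_true _ _ |>.mp hk with hs | hb
        · simp [fcbEnd, hs]
        · simp only [fcbEnd]
          simp only [Bool.not_eq_true'] at hb
          simp [hb]
          intro h; simp [decide_eq_true_eq] at hb; omega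
      obtain ⟨h1, h2⟩ := ih (s+1) n (by omega) (by omega)
      refine ⟨by omega, ?_⟩
      rw [hrec]
      have hse : s < fcbEnd lines pI n (PySem.List.pyRange (s+1) n 1) := by omega
      rw [PySem.List.pyRange_one_cons hse, h2]
      simp [List.takeWhile, hk]
    · have : fcbEnd lines pI n (s :: PySem.List.pyRange (s+1) n 1) = s := by
        simp only [fcbKeep, Bool.or_eq_true, Bool.not_eq_true', not_or] at hk
        push_neg at hk
        simp only [fcbEnd]
        simp only [Bool.not_eq_true] at hk
        have h1 := hk.1; have h2 := hk.2
        simp [h1]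
        simp [decide_eq_false_iff_not] at h2
        simp [h2]
      rw [this]
      refine ⟨le_refl s, ?_⟩
      simp only [List.takeWhile]
      simp only [hk]
      simp [PySem.List.pyRange_zero]

-- ===== VERDICT (by name: the statement is the Claim_ definition above) =====
theorem find_child_block_spec : Claim_equal_find_child_block := by
  intro lines parent_idx key name _hDom _hPre
  unfold Spec_find_child_block find_child_block find_child_block_alt
  by_cases hge : (lines.length : Int) ≤ parent_idx
  · simp [hge]
  · simp only [hge, if_neg, if_false]
    have hle : parent_idx + 1 ≤ (lines.length : Int) := by omega
    obtain ⟨_, h2⟩ := fcbEnd_spec lines (get_indent (PySem.List.pyGetD lines parent_idx ""))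
      (((lines.length : Int) - (parent_idx + 1)).toNat) (parent_idx + 1) (lines.length : Int) hle rfl
    rw [loopA_eq_loopB_takeWhile, ← h2]
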